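-- pv_equiv track=rewrite | github.com/WWarzecha/Algorithms-and-Data-Structures | Dynamic programming problems with tests/zad5k.py | garek
-- ===== SOURCE A (Python) =====
-- def garek ( A ):
--     n = len(A)
--     F = [[None for _ in range(n)] for _ in range(n)]
--
--     for i in range(n):
--         F[i][i] = (A[i],0)
--
--     for i in range(n-1):
--         F[i][i+1] = (max(A[i],A[i+1]),min(A[i],A[i+1]))
--
--     for l in range(2,n):
--         for j in range(l,n):
--             i = j-l
--             if A[i] + F[i+1][j][1] > A[j] + F[i][j-1][1]:
--                 F[i][j] = (A[i] + F[i+1][j][1], F[i+1][j][0])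
--             else:
--                 F[i][j] = (A[j] + F[i][j-1][1], F[i][j-1][0])
--             # F[i][j] = (max(A[i] + F[i+1][j][1], A[j] + F[i][j-1][1]),)
--
--     return max(F[0][n-1])
--     return 0
-- ===== SOURCE B (Python) =====
-- def garek(A):
--     # Top-down memoized recursion instead of A's bottom-up diagonal table.
--     n = len(A)
--     memo = {}
--
--     def solve(i, j):
--         # returns (current player's score, opponent's score) for segment A[i..j]
--         if (i, j) in memo:
--             return memo[(i, j)]
--         if i == j:
--             res = (A[i], 0)
--         elif j == i + 1:
--             res = (max(A[i], A[j]), min(A[i], A[j]))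
--         else:
--             u = solve(i + 1, j)
--             v = solve(i, j - 1)
--             if A[i] + u[1] > A[j] + v[1]:
--                 res = (A[i] + u[1], u[0])
--             else:
--                 res = (A[j] + v[1], v[0])
--         memo[(i, j)] = res
--         return res
--
--     return max(solve(0, n - 1))
-- ===== Notes on version B (the rewrite author's own statement) =====
-- stated objective: alternative
-- what changed: Replaced A's bottom-up diagonal DP over a full n*n table of tuples with a top-down memoized recursion solve(i,j) computing the same (score, opponent) pairs, so only reachable subintervals are computed and no table is allocated.
import Mathlib
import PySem

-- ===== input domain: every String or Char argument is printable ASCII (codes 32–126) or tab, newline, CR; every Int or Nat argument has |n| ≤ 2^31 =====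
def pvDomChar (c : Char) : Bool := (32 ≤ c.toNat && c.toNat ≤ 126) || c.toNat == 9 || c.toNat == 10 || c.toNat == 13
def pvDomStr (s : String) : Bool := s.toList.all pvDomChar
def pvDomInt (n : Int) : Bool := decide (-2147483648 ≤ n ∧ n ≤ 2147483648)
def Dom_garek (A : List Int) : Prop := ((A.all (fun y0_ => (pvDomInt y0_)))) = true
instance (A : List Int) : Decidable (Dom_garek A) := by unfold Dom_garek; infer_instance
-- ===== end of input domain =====

-- B changes the decomposition: a top-down recursion solve(i,j) (memoized in Python) replaces
-- A's bottom-up diagonal DP table; equal results are proved for every non-empty list.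

-- ===== PORT A =====
-- A[i] for an index that is always in range in every executed statement (exact here)
def getI (A : List Int) (i : Nat) : Int := A.getD i 0
-- F[i][j] read / write on the list-of-lists table
def tget (F : List (List (Option (Int × Int)))) (i j : Nat) : Option (Int × Int) :=
  (F.getD i []).getD j none
def tset (F : List (List (Option (Int × Int)))) (i j : Nat) (v : Int × Int) :
    List (List (Option (Int × Int))) :=
  F.set i ((F.getD i []).set j (some v))

-- the body of A's innermost loop (the statement block under 'for j in range(l, n)')
def innerBody (A : List Int) (l : Nat) (F : List (List (Option (Int × Int)))) (j : Nat) :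
    List (List (Option (Int × Int))) :=
  let i := j - l
  let u := (tget F (i+1) j).getD (0, 0)   -- always a filled cell when executed
  let v := (tget F i (j-1)).getD (0, 0)   -- always a filled cell when executed
  if getI A i + u.2 > getI A j + v.2 then tset F i j (getI A i + u.2, u.1)
  else tset F i j (getI A j + v.2, v.1)

def garek (A : List Int) : Int :=
  let n := A.length
  let F0 : List (List (Option (Int × Int))) := List.replicate n (List.replicate n none)
  -- for i in range(n): F[i][i] = (A[i], 0)
  let F1 := (List.range n).foldl (fun F i => tset F i i (getI A i, 0)) F0
  -- for i in range(n-1): F[i][i+1] = (max, min)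
  let F2 := (List.range (n-1)).foldl
    (fun F i => tset F i (i+1)
      (max (getI A i) (getI A (i+1)), min (getI A i) (getI A (i+1)))) F1
  -- for l in range(2, n): for j in range(l, n): …
  let F3 := (List.range' 2 (n-2)).foldl
      (fun F l => (List.range' l (n-l)).foldl (innerBody A l) F) F2
  -- the final 'return max(...)' on the top-right cell; Python raises IndexError when n = 0 (excluded by Pre_garek)
  match tget F3 0 (n-1) with
  | some p => max p.1 p.2
  | none => 0

-- ===== PORT B =====
-- Source B's solve(i, j); the Python memo dict is pure caching of this same recurrence.
-- 'j ≤ i' is Source B's 'i == j': every call Source B makes has i ≤ j (exact on those calls).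
def solveBR (A : List Int) (i j : Nat) : Int × Int :=
  if j ≤ i then (getI A i, 0)
  else if j = i + 1 then (max (getI A i) (getI A j), min (getI A i) (getI A j))
  else
    let u := solveBR A (i+1) j
    let v := solveBR A i (j-1)
    if getI A i + u.2 > getI A j + v.2 then (getI A i + u.2, u.1)
    else (getI A j + v.2, v.1)
termination_by j - i
decreasing_by all_goals omega

def garek_alt (A : List Int) : Int :=
  let p := solveBR A 0 (A.length - 1)
  max p.1 p.2

-- ===== PRECONDITION & SPEC =====
-- Pre_ excludes only the empty list, on which Python A raises IndexError indexing the empty table.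
def Pre_garek (A : List Int) : Prop := A ≠ []
instance (A : List Int) : Decidable (Pre_garek A) := by unfold Pre_garek; infer_instance
def pvWitness_garek : List Int := [3, 1, 4, 1, 5]

def Spec_garek (A : List Int) (out : Int) : Prop := out = garek_alt A
instance (A : List Int) (out : Int) : Decidable (Spec_garek A out) := by unfold Spec_garek; infer_instance

-- ===== CLAIM (what is proved, stated in full; the proofs are below) =====
def Claim_equal_garek : Prop := ∀ (A : List Int), Dom_garek A → Pre_garek A → Spec_garek A (garek A)

-- ===== LEMMAS AND PROOFS =====

-- the table always has n rows of length n
def Shape (n : Nat) (F : List (List (Option (Int × Int)))) : Prop :=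
  F.length = n ∧ ∀ k, (F.getD k []).length = if k < n then n else 0

-- cells of gap < m are filled with solveBR's value
def Fill (A : List Int) (m : Nat) (F : List (List (Option (Int × Int)))) : Prop :=
  ∀ i j : Nat, i ≤ j → j < A.length → j - i < m → tget F i j = some (solveBR A i j)

theorem shape_replicate (n : Nat) :
    Shape n (List.replicate n (List.replicate n (none : Option (Int × Int)))) := by
  refine ⟨by simp, fun k => ?_⟩
  by_cases h : k < n <;>
    simp [List.getD_eq_getElem?_getD, h]

-- what each row of the table looks like after one write
theorem row_tset (F : List (List (Option (Int × Int)))) (i j : Nat) (v : Int × Int) (k : Nat) :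
    (tset F i j v).getD k [] =
      if k = i ∧ i < F.length then (F.getD i []).set j (some v) else F.getD k [] := by
  by_cases hk : k = i
  · subst hk
    by_cases hF : k < F.length
    · simp [tset, List.getD_eq_getElem?_getD, hF]
    · simp [tset, List.getD_eq_getElem?_getD, hF]
  · have : i ≠ k := fun h => hk h.symm
    simp [tset, List.getD_eq_getElem?_getD, List.getElem?_set_ne this, hk]

theorem shape_tset (n : Nat) (F : List (List (Option (Int × Int)))) (i j : Nat)
    (v : Int × Int) (h : Shape n F) : Shape n (tset F i j v) := by
  obtain ⟨h1, h2⟩ := h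
  refine ⟨by simp [tset, h1], fun k => ?_⟩
  rw [row_tset]
  by_cases hk : k = i ∧ i < F.length
  · rw [if_pos hk, List.length_set, hk.1]
    have := h2 i
    simpa [show i < n by omega] using this
  · rw [if_neg hk]; exact h2 k

theorem tget_tset_self (n : Nat) (F : List (List (Option (Int × Int)))) (i j : Nat)
    (v : Int × Int) (h : Shape n F) (hi : i < n) (hj : j < n) :
    tget (tset F i j v) i j = some v := by
  obtain ⟨h1, h2⟩ := h
  have hrow : (F.getD i []).length = n := by have := h2 i; simpa [hi] using this
  rw [tget, row_tset, if_pos ⟨rfl, by omega⟩, List.getD_eq_getElem?_getD,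
    List.getElem?_set_self (by omega : j < (F.getD i []).length)]
  rfl

theorem tget_tset_ne (F : List (List (Option (Int × Int)))) (i j i' j' : Nat)
    (v : Int × Int) (h : i' ≠ i ∨ j' ≠ j) :
    tget (tset F i j v) i' j' = tget F i' j' := by
  rw [tget, row_tset]
  by_cases hk : i' = i ∧ i < F.length
  · have hj : j' ≠ j := by
      rcases h with h | h
      · exact absurd hk.1 h
      · exact h
    rw [if_pos hk, List.getD_eq_getElem?_getD, List.getElem?_set_ne (Ne.symm hj),
      ← List.getD_eq_getElem?_getD, tget, hk.1]
  · rw [if_neg hk]; rfl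

-- solveBR's three defining equations
theorem solveBR_diag (A : List Int) (i : Nat) : solveBR A i i = (getI A i, 0) := by
  rw [solveBR]; simp

theorem solveBR_adj (A : List Int) (i : Nat) :
    solveBR A i (i+1) = (max (getI A i) (getI A (i+1)), min (getI A i) (getI A (i+1))) := by
  rw [solveBR]; simp

theorem solveBR_step (A : List Int) (i j : Nat) (h1 : ¬ j ≤ i) (h2 : ¬ j = i + 1) :
    solveBR A i j =
      if getI A i + (solveBR A (i+1) j).2 > getI A j + (solveBR A i (j-1)).2 then
        (getI A i + (solveBR A (i+1) j).2, (solveBR A (i+1) j).1)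
      else (getI A j + (solveBR A i (j-1)).2, (solveBR A i (j-1)).1) := by
  conv_lhs => rw [solveBR]
  rw [if_neg h1, if_neg h2]

-- phase 1: the diagonal loop writes (A[i],0) at (i,i) and touches nothing else
theorem phase1 (A : List Int) (n : Nat) (L : List Nat) (F : List (List (Option (Int × Int))))
    (hsh : Shape n F) (hL : ∀ x ∈ L, x < n) :
    Shape n (L.foldl (fun F i => tset F i i (getI A i, 0)) F) ∧
    ∀ i' j', tget (L.foldl (fun F i => tset F i i (getI A i, 0)) F) i' j' =
      if i' = j' ∧ i' ∈ L then some (getI A i', 0) else tget F i' j' := by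
  induction L generalizing F with
  | nil => simpa using hsh
  | cons a L ih =>
    have ha : a < n := hL a (by simp)
    have hsh' := shape_tset n F a a (getI A a, 0) hsh
    obtain ⟨s, e⟩ := ih (tset F a a (getI A a, 0)) hsh' (fun x hx => hL x (by simp [hx]))
    refine ⟨s, fun i' j' => ?_⟩
    rw [List.foldl_cons, e i' j']
    by_cases h1 : i' = j' ∧ i' ∈ L
    · obtain ⟨rfl, hm⟩ := h1
      simp [hm]
    · by_cases h2 : i' = j' ∧ i' = a
      · obtain ⟨rfl, rfl⟩ : i' = j' ∧ i' = a := h2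
        by_cases hm : i' ∈ L <;>
          simp [hm, tget_tset_self n F i' i' _ hsh ha ha]
      · have hno : ¬ (i' = j' ∧ i' ∈ a :: L) := by
          rintro ⟨rfl, hm⟩
          rcases List.mem_cons.mp hm with rfl | hm
          · exact h2 ⟨rfl, rfl⟩
          · exact h1 ⟨rfl, hm⟩
        rw [if_neg h1, if_neg hno, tget_tset_ne]
        by_cases hia : i' = a
        · right; intro hja; exact h2 ⟨by omega, hia⟩
        · left; exact hia

-- phase 2: the second loop writes at (i, i+1) and touches nothing else
theorem phase2 (A : List Int) (n : Nat) (L : List Nat) (F : List (List (Option (Int × Int))))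
    (hsh : Shape n F) (hL : ∀ x ∈ L, x + 1 < n) :
    Shape n (L.foldl (fun F i => tset F i (i+1)
        (max (getI A i) (getI A (i+1)), min (getI A i) (getI A (i+1)))) F) ∧
    ∀ i' j', tget (L.foldl (fun F i => tset F i (i+1)
        (max (getI A i) (getI A (i+1)), min (getI A i) (getI A (i+1)))) F) i' j' =
      if j' = i' + 1 ∧ i' ∈ L then
        some (max (getI A i') (getI A (i'+1)), min (getI A i') (getI A (i'+1)))
      else tget F i' j' := by
  induction L generalizing F with
  | nil => simpa using hsh
  | cons a L ih =>
    have ha : a + 1 < n := hL a (by simp)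
    have hsh' := shape_tset n F a (a+1)
      (max (getI A a) (getI A (a+1)), min (getI A a) (getI A (a+1))) hsh
    obtain ⟨s, e⟩ := ih (tset F a (a+1)
      (max (getI A a) (getI A (a+1)), min (getI A a) (getI A (a+1)))) hsh'
      (fun x hx => hL x (by simp [hx]))
    refine ⟨s, fun i' j' => ?_⟩
    rw [List.foldl_cons, e i' j']
    by_cases h1 : j' = i' + 1 ∧ i' ∈ L
    · obtain ⟨rfl, hm⟩ := h1
      simp [hm]
    · by_cases h2 : j' = i' + 1 ∧ i' = a
      · obtain ⟨rfl, rfl⟩ : j' = i' + 1 ∧ i' = a := h2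
        by_cases hm : i' ∈ L <;>
          simp [hm, tget_tset_self n F i' (i'+1) _ hsh (by omega) ha]
      · have hno : ¬ (j' = i' + 1 ∧ i' ∈ a :: L) := by
          rintro ⟨rfl, hm⟩
          rcases List.mem_cons.mp hm with rfl | hm
          · exact h2 ⟨rfl, rfl⟩
          · exact h1 ⟨rfl, hm⟩
        rw [if_neg h1, if_neg hno, tget_tset_ne]
        by_cases hia : i' = a
        · right; intro hja; exact h2 ⟨by omega, hia⟩
        · left; exact hia

-- phase 3, inner loop: processing j = j0, …, j0+c-1 fills the gap-l cells up to column j0+c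
theorem inner (A : List Int) (l : Nat) (hl : 2 ≤ l) (c : Nat) :
    ∀ (j0 : Nat) (F : List (List (Option (Int × Int)))),
    Shape A.length F → l ≤ j0 → j0 + c ≤ A.length → Fill A l F →
    (∀ j, l ≤ j → j < j0 → tget F (j-l) j = some (solveBR A (j-l) j)) →
    Shape A.length ((List.range' j0 c).foldl (innerBody A l) F) ∧
    Fill A l ((List.range' j0 c).foldl (innerBody A l) F) ∧
    (∀ j, l ≤ j → j < j0 + c →
      tget ((List.range' j0 c).foldl (innerBody A l) F) (j-l) j = some (solveBR A (j-l) j)) := by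
  induction c with
  | zero =>
    intro j0 F hsh _ _ hfill hrow
    simpa using ⟨hsh, hfill, fun j h1 h2 => hrow j h1 h2⟩
  | succ c ih =>
    intro j0 F hsh hj0 hc hfill hrow
    rw [List.range'_succ, List.foldl_cons]
    have hin : j0 < A.length := by omega
    have hu : tget F (j0 - l + 1) j0 = some (solveBR A (j0 - l + 1) j0) :=
      hfill (j0 - l + 1) j0 (by omega) hin (by omega)
    have hv : tget F (j0 - l) (j0 - 1) = some (solveBR A (j0 - l) (j0 - 1)) :=
      hfill (j0 - l) (j0 - 1) (by omega) (by omega) (by omega)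
    have hbody : innerBody A l F j0 = tset F (j0 - l) j0 (solveBR A (j0 - l) j0) := by
      rw [innerBody]
      simp only [hu, hv, Option.getD_some]
      rw [solveBR_step A (j0 - l) j0 (by omega) (by omega)]
      by_cases hq : getI A (j0 - l) + (solveBR A (j0 - l + 1) j0).2 >
          getI A j0 + (solveBR A (j0 - l) (j0 - 1)).2 <;> simp [hq]
    rw [hbody]
    have hsh' := shape_tset A.length F (j0 - l) j0 (solveBR A (j0 - l) j0) hsh
    have hfill' : Fill A l (tset F (j0 - l) j0 (solveBR A (j0 - l) j0)) := by
      intro i' j' h1 h2 h3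
      rw [tget_tset_ne]
      · exact hfill i' j' h1 h2 h3
      · by_cases e : i' = j0 - l
        · right; omega
        · left; exact e
    have hrow' : ∀ j, l ≤ j → j < j0 + 1 →
        tget (tset F (j0 - l) j0 (solveBR A (j0 - l) j0)) (j-l) j =
          some (solveBR A (j-l) j) := by
      intro j h1 h2
      by_cases e : j = j0
      · subst e
        exact tget_tset_self A.length F (j - l) j _ hsh (by omega) hin
      · rw [tget_tset_ne _ _ _ _ _ _ (Or.inr (by omega))]
        exact hrow j h1 (by omega)
    obtain ⟨s, f, r⟩ := ih (j0+1) (tset F (j0 - l) j0 (solveBR A (j0 - l) j0))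
      hsh' (by omega) (by omega) hfill' hrow'
    exact ⟨s, f, fun j h1 h2 => r j h1 (by omega)⟩

-- phase 3, outer loop over l = l0, …, l0+c-1
theorem outer (A : List Int) (c : Nat) :
    ∀ (l0 : Nat) (F : List (List (Option (Int × Int)))),
    2 ≤ l0 → Shape A.length F → Fill A l0 F →
    Shape A.length ((List.range' l0 c).foldl
      (fun F l => (List.range' l (A.length - l)).foldl (innerBody A l) F) F) ∧
    Fill A (l0 + c) ((List.range' l0 c).foldl
      (fun F l => (List.range' l (A.length - l)).foldl (innerBody A l) F) F) := by
  induction c with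
  | zero =>
    intro l0 F _ hsh hfill
    simpa using ⟨hsh, hfill⟩
  | succ c ih =>
    intro l0 F hl0 hsh hfill
    rw [List.range'_succ, List.foldl_cons]
    by_cases hn : l0 ≤ A.length
    · obtain ⟨s, f, r⟩ := inner A l0 hl0 (A.length - l0) l0 F hsh (le_refl _)
        (by omega) hfill (by intro j h1 h2; omega)
    -- one more diagonal is now known to be filled
      have hfill' : Fill A (l0 + 1)
          ((List.range' l0 (A.length - l0)).foldl (innerBody A l0) F) := by
        intro i j h1 h2 h3
        by_cases e : j - i < l0
        · exact f i j h1 h2 e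
        · have hij : i = j - l0 := by omega
          rw [hij]
          exact r j (by omega) (by omega)
      obtain ⟨s2, f2⟩ := ih (l0 + 1)
        ((List.range' l0 (A.length - l0)).foldl (innerBody A l0) F) (by omega) s hfill'
      exact ⟨s2, by simpa [Nat.add_assoc, Nat.add_comm 1 c] using f2⟩
    · have hempty : A.length - l0 = 0 := by omega
      rw [hempty, List.range'_zero, List.foldl_nil]
      have hfill' : Fill A (l0 + 1) F := fun i j h1 h2 h3 => hfill i j h1 h2 (by omega)
      obtain ⟨s2, f2⟩ := ih (l0 + 1) F (by omega) hsh hfill'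
      exact ⟨s2, by simpa [Nat.add_assoc, Nat.add_comm 1 c] using f2⟩

-- after the first two loops all cells of gap ≤ 1 are filled
theorem fill_F2 (A : List Int) :
    Shape A.length ((List.range (A.length - 1)).foldl
      (fun F i => tset F i (i+1)
        (max (getI A i) (getI A (i+1)), min (getI A i) (getI A (i+1))))
      ((List.range A.length).foldl (fun F i => tset F i i (getI A i, 0))
        (List.replicate A.length (List.replicate A.length none)))) ∧
    Fill A 2 ((List.range (A.length - 1)).foldl
      (fun F i => tset F i (i+1)
        (max (getI A i) (getI A (i+1)), min (getI A i) (getI A (i+1))))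
      ((List.range A.length).foldl (fun F i => tset F i i (getI A i, 0))
        (List.replicate A.length (List.replicate A.length none)))) := by
  obtain ⟨s1, e1⟩ := phase1 A A.length (List.range A.length) _
    (shape_replicate A.length) (by simp)
  obtain ⟨s2, e2⟩ := phase2 A A.length (List.range (A.length - 1)) _ s1
    (by intro x hx; simp at hx; omega)
  refine ⟨s2, ?_⟩
  intro i j h1 h2 h3
  rw [e2 i j]
  by_cases e : j = i + 1
  · subst e
    rw [if_pos ⟨rfl, List.mem_range.mpr (by omega)⟩, solveBR_adj]
  · have hij : j = i := by omega
    subst hij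
    rw [if_neg (by simp), e1, if_pos ⟨rfl, List.mem_range.mpr h2⟩, solveBR_diag]

-- ===== VERDICT (by name: the statement is the Claim_ definition above) =====
theorem garek_spec : Claim_equal_garek := by
  intro A _ hpre
  simp only [Spec_garek, garek, garek_alt]
  obtain ⟨s2, f2⟩ := fill_F2 A
  have hn : 1 ≤ A.length := by
    cases A with
    | nil => exact absurd rfl hpre
    | cons a t => simp
  obtain ⟨s3, f3⟩ := outer A (A.length - 2) 2 _ (by norm_num) s2 f2
  have hfin := f3 0 (A.length - 1) (by omega) (by omega) (by omega)
  rw [hfin]
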